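-- pv_equiv track=rewrite | github.com/foskitttatwit/DF-project | PWC.py | has_sequential_pattern
-- ===== SOURCE A (Python) =====
-- def has_sequential_pattern(password: str) -> bool:
--     sequences = [
--         "123", "234", "345", "456", "567", "678", "789",
--         "abc", "bcd", "cde", "def", "efg",
--         "qwe", "wer", "ert", "rty", "tyu", "yui"
--     ]
--     pwd_lower = password.lower()
--     return any(seq in pwd_lower for seq in sequences)
-- ===== SOURCE B (Python) =====
-- _CHAINS = ("123456789", "abcdefg", "qwertyui")
--
--
-- def _trip(a, b, c):
--     t = a + b + c
--     return any(t in chain for chain in _CHAINS)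
--
--
-- def has_sequential_pattern(password: str) -> bool:
--     p = password.lower()
--     return any(_trip(a, b, c) for a, b, c in zip(p, p[1:], p[2:]))
-- ===== Notes on version B (the rewrite author's own statement) =====
-- stated objective: alternative
-- what changed: B slides a length-3 window over the lowercased password and asks whether each 3-gram a+b+c is a substring of one of three short chain strings (123456789, abcdefg, qwertyui), replacing A's 18 full-password substring scans.
import Mathlib
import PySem

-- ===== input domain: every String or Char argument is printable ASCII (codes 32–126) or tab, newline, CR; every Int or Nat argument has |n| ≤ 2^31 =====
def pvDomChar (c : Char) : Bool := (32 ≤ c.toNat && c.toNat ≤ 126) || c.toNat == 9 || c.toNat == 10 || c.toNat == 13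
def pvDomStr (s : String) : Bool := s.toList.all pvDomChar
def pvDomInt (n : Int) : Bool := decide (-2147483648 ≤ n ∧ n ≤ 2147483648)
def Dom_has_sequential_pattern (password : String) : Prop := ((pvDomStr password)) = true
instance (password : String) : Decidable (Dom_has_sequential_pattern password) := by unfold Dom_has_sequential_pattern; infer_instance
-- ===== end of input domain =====

-- B lowercases the password and slides a length-3 window over it, testing whether each 3-gram
-- is a substring of one of three chain strings ("123456789", "abcdefg", "qwertyui"), instead of
-- scanning the whole password once per each of A's 18 patterns (alternative; same cost class).

-- ===== PORT A =====
def pwcSequences : List String :=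
  ["123", "234", "345", "456", "567", "678", "789",
   "abc", "bcd", "cde", "def", "efg",
   "qwe", "wer", "ert", "rty", "tyu", "yui"]

def has_sequential_pattern (password : String) : Bool :=
  let pwd_lower := PySem.Str.lower password
  pwcSequences.any (fun seq => PySem.Str.isIn seq pwd_lower)

-- ===== PORT B =====
def pwcChains : List String := ["123456789", "abcdefg", "qwertyui"]

-- _trip(a, b, c): is the 3-gram a+b+c a substring of one of the chains?
def pwcTrip (a b c : Char) : Bool :=
  let t : List Char := [a, b, c]
  pwcChains.any (fun chain => PySem.Chars.isIn t chain.toList)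

-- zip(p, p[1:], p[2:]) ported as List.zip of the shifted lists (zip truncates, as in Python)
def has_sequential_pattern_alt (password : String) : Bool :=
  let p := (PySem.Str.lower password).toList
  ((p.zip (p.drop 1)).zip (p.drop 2)).any (fun x => pwcTrip x.1.1 x.1.2 x.2)

-- ===== PRECONDITION & SPEC =====
def Spec_has_sequential_pattern (password : String) (out : Bool) : Prop := out = has_sequential_pattern_alt password
instance (password : String) (out : Bool) : Decidable (Spec_has_sequential_pattern password out) := by unfold Spec_has_sequential_pattern; infer_instance

-- ===== CLAIM (what is proved, stated in full; the proofs are below) =====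
def Claim_equal_has_sequential_pattern : Prop := ∀ (password : String), Dom_has_sequential_pattern password → Spec_has_sequential_pattern password (has_sequential_pattern password)

-- ===== LEMMAS AND PROOFS =====

-- A length-3 pattern is an infix of p iff it appears at some window position i.
theorem triple_infix_iff (a b c : Char) (p : List Char) :
    [a,b,c] <:+: p ↔ ∃ i, ∃ _ : i + 2 < p.length, p[i] = a ∧ p[i+1] = b ∧ p[i+2] = c := by
  constructor
  · intro h
    have := (PySem.Chars.isIn_iff_infix [a,b,c] p).mpr h
    obtain ⟨j, hpre⟩ := (PySem.Chars.exists_prefix_drop_iff_isIn [a,b,c] p).mpr this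
    obtain ⟨t, ht⟩ := hpre
    have hd : p.drop j = a :: b :: c :: t := by rw [← ht]; rfl
    have hlen : j + 2 < p.length := by
      have := congrArg List.length hd
      simp [List.length_drop] at this
      omega
    have h0 : p[j + 0]? = some a := by
      have := List.getElem?_drop (xs := p) (i := j) (j := 0); rw [hd] at this; simpa using this.symm
    have h1 : p[j + 1]? = some b := by
      have := List.getElem?_drop (xs := p) (i := j) (j := 1); rw [hd] at this; simpa using this.symm
    have h2 : p[j + 2]? = some c := by
      have := List.getElem?_drop (xs := p) (i := j) (j := 2); rw [hd] at this; simpa using this.symm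
    refine ⟨j, hlen, ?_, ?_, ?_⟩
    · exact (List.getElem_eq_iff (by omega)).mpr (by simpa using h0)
    · exact (List.getElem_eq_iff (by omega)).mpr h1
    · exact (List.getElem_eq_iff (by omega)).mpr h2
  · rintro ⟨i, h, rfl, rfl, rfl⟩
    have hpre : [p[i], p[i+1], p[i+2]] <+: p.drop i := by
      refine List.prefix_iff_eq_take.mpr ?_
      apply List.ext_getElem
      · simp; omega
      · intro k hk1 hk2
        simp only [List.length_cons, List.length_nil] at hk1
        interval_cases k <;>
          simp [List.getElem_take, List.getElem_drop, Nat.add_comm]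
    exact hpre.isInfix.trans (List.drop_suffix i p).isInfix

-- B's zip-of-zips .any is exactly "some window position satisfies the predicate".
theorem zip3_any_iff (p : List Char) (f : (Char × Char) × Char → Bool) :
    ((p.zip (p.drop 1)).zip (p.drop 2)).any f = true ↔
      ∃ i, ∃ _ : i + 2 < p.length, f ((p[i], p[i+1]), p[i+2]) = true := by
  rw [List.any_eq_true]
  constructor
  · rintro ⟨x, hx, hf⟩
    rw [List.mem_iff_getElem] at hx
    obtain ⟨i, hi, rfl⟩ := hx
    simp only [List.length_zip, List.length_drop] at hi
    have h2 : i + 2 < p.length := by omega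
    refine ⟨i, h2, ?_⟩
    simpa [List.getElem_zip, List.getElem_drop, Nat.add_comm] using hf
  · rintro ⟨i, h2, hf⟩
    refine ⟨((p[i], p[i+1]), p[i+2]), ?_, hf⟩
    rw [List.mem_iff_getElem]
    refine ⟨i, by simp [List.length_zip]; omega, ?_⟩
    simp [List.getElem_zip, List.getElem_drop, Nat.add_comm]

-- The 3-grams occurring inside each chain, listed explicitly.
theorem chain9_iff (a b c : Char) :
    PySem.Chars.isIn [a,b,c] ['1','2','3','4','5','6','7','8','9'] = true ↔
      (a = '1' ∧ b = '2' ∧ c = '3') ∨ (a = '2' ∧ b = '3' ∧ c = '4') ∨ (a = '3' ∧ b = '4' ∧ c = '5') ∨ (a = '4' ∧ b = '5' ∧ c = '6') ∨ (a = '5' ∧ b = '6' ∧ c = '7') ∨ (a = '6' ∧ b = '7' ∧ c = '8') ∨ (a = '7' ∧ b = '8' ∧ c = '9') := by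
  constructor
  · rw [PySem.Chars.isIn_iff_infix, List.infix_iff_prefix_suffix]
    rintro ⟨t, hp, hs⟩
    rw [← List.mem_tails] at hs
    fin_cases hs <;> simp_all [List.cons_prefix_cons]
  · rintro (⟨rfl,rfl,rfl⟩|⟨rfl,rfl,rfl⟩|⟨rfl,rfl,rfl⟩|⟨rfl,rfl,rfl⟩|⟨rfl,rfl,rfl⟩|⟨rfl,rfl,rfl⟩|⟨rfl,rfl,rfl⟩) <;> decide

theorem chain7_iff (a b c : Char) :
    PySem.Chars.isIn [a,b,c] ['a','b','c','d','e','f','g'] = true ↔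
      (a = 'a' ∧ b = 'b' ∧ c = 'c') ∨ (a = 'b' ∧ b = 'c' ∧ c = 'd') ∨ (a = 'c' ∧ b = 'd' ∧ c = 'e') ∨ (a = 'd' ∧ b = 'e' ∧ c = 'f') ∨ (a = 'e' ∧ b = 'f' ∧ c = 'g') := by
  constructor
  · rw [PySem.Chars.isIn_iff_infix, List.infix_iff_prefix_suffix]
    rintro ⟨t, hp, hs⟩
    rw [← List.mem_tails] at hs
    fin_cases hs <;> simp_all [List.cons_prefix_cons]
  · rintro (⟨rfl,rfl,rfl⟩|⟨rfl,rfl,rfl⟩|⟨rfl,rfl,rfl⟩|⟨rfl,rfl,rfl⟩|⟨rfl,rfl,rfl⟩) <;> decide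

theorem chain8_iff (a b c : Char) :
    PySem.Chars.isIn [a,b,c] ['q','w','e','r','t','y','u','i'] = true ↔
      (a = 'q' ∧ b = 'w' ∧ c = 'e') ∨ (a = 'w' ∧ b = 'e' ∧ c = 'r') ∨ (a = 'e' ∧ b = 'r' ∧ c = 't') ∨ (a = 'r' ∧ b = 't' ∧ c = 'y') ∨ (a = 't' ∧ b = 'y' ∧ c = 'u') ∨ (a = 'y' ∧ b = 'u' ∧ c = 'i') := by
  constructor
  · rw [PySem.Chars.isIn_iff_infix, List.infix_iff_prefix_suffix]
    rintro ⟨t, hp, hs⟩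
    rw [← List.mem_tails] at hs
    fin_cases hs <;> simp_all [List.cons_prefix_cons]
  · rintro (⟨rfl,rfl,rfl⟩|⟨rfl,rfl,rfl⟩|⟨rfl,rfl,rfl⟩|⟨rfl,rfl,rfl⟩|⟨rfl,rfl,rfl⟩|⟨rfl,rfl,rfl⟩) <;> decide

-- The 3-gram [a,b,c] is inside some chain iff it is one of A's 18 patterns.
theorem trip_iff (a b c : Char) :
    pwcTrip a b c = true ↔ ∃ seq ∈ pwcSequences, seq.toList = [a, b, c] := by
  unfold pwcTrip pwcChains
  simp only [List.any_eq_true, List.mem_cons, List.not_mem_nil, or_false]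
  constructor
  · rintro ⟨chain, (rfl|rfl|rfl), h⟩
    · rw [show "123456789".toList = ['1','2','3','4','5','6','7','8','9'] from by decide,
        chain9_iff] at h
      rcases h with ⟨rfl,rfl,rfl⟩|⟨rfl,rfl,rfl⟩|⟨rfl,rfl,rfl⟩|⟨rfl,rfl,rfl⟩|⟨rfl,rfl,rfl⟩|⟨rfl,rfl,rfl⟩|⟨rfl,rfl,rfl⟩ <;>
        first
        | exact ⟨"123", by simp [pwcSequences], by decide⟩
        | exact ⟨"234", by simp [pwcSequences], by decide⟩
        | exact ⟨"345", by simp [pwcSequences], by decide⟩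
        | exact ⟨"456", by simp [pwcSequences], by decide⟩
        | exact ⟨"567", by simp [pwcSequences], by decide⟩
        | exact ⟨"678", by simp [pwcSequences], by decide⟩
        | exact ⟨"789", by simp [pwcSequences], by decide⟩
    · rw [show "abcdefg".toList = ['a','b','c','d','e','f','g'] from by decide,
        chain7_iff] at h
      rcases h with ⟨rfl,rfl,rfl⟩|⟨rfl,rfl,rfl⟩|⟨rfl,rfl,rfl⟩|⟨rfl,rfl,rfl⟩|⟨rfl,rfl,rfl⟩ <;>
        first
        | exact ⟨"abc", by simp [pwcSequences], by decide⟩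
        | exact ⟨"bcd", by simp [pwcSequences], by decide⟩
        | exact ⟨"cde", by simp [pwcSequences], by decide⟩
        | exact ⟨"def", by simp [pwcSequences], by decide⟩
        | exact ⟨"efg", by simp [pwcSequences], by decide⟩
    · rw [show "qwertyui".toList = ['q','w','e','r','t','y','u','i'] from by decide,
        chain8_iff] at h
      rcases h with ⟨rfl,rfl,rfl⟩|⟨rfl,rfl,rfl⟩|⟨rfl,rfl,rfl⟩|⟨rfl,rfl,rfl⟩|⟨rfl,rfl,rfl⟩|⟨rfl,rfl,rfl⟩ <;>
        first
        | exact ⟨"qwe", by simp [pwcSequences], by decide⟩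
        | exact ⟨"wer", by simp [pwcSequences], by decide⟩
        | exact ⟨"ert", by simp [pwcSequences], by decide⟩
        | exact ⟨"rty", by simp [pwcSequences], by decide⟩
        | exact ⟨"tyu", by simp [pwcSequences], by decide⟩
        | exact ⟨"yui", by simp [pwcSequences], by decide⟩
  · rintro ⟨seq, hm, hts⟩
    rw [pwcSequences] at hm
    fin_cases hm <;> rw [← hts] <;>
      first
      | exact ⟨"123456789", Or.inl rfl, by decide⟩
      | exact ⟨"abcdefg", Or.inr (Or.inl rfl), by decide⟩
      | exact ⟨"qwertyui", Or.inr (Or.inr rfl), by decide⟩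

-- Every pattern of A has exactly three characters.
theorem seq_three (seq : String) (hm : seq ∈ pwcSequences) : ∃ a b c, seq.toList = [a,b,c] := by
  fin_cases hm <;> exact ⟨_, _, _, rfl⟩

-- The two ports agree on every password.
theorem ports_agree (password : String) :
    has_sequential_pattern password = has_sequential_pattern_alt password := by
  unfold has_sequential_pattern has_sequential_pattern_alt
  rw [Bool.eq_iff_iff]
  rw [zip3_any_iff]
  simp only [List.any_eq_true, PySem.Str.isIn_eq, PySem.Chars.isIn_iff_infix]
  constructor
  · rintro ⟨seq, hm, hinf⟩
    obtain ⟨a, b, c, hts⟩ := seq_three seq hm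
    rw [hts] at hinf
    obtain ⟨i, h, ha, hb, hc⟩ := (triple_infix_iff a b c _).mp hinf
    refine ⟨i, h, ?_⟩
    rw [trip_iff]
    exact ⟨seq, hm, by rw [hts, ha, hb, hc]⟩
  · rintro ⟨i, h, htrip⟩
    rw [trip_iff] at htrip
    obtain ⟨seq, hm, hts⟩ := htrip
    refine ⟨seq, hm, ?_⟩
    rw [hts]
    exact (triple_infix_iff _ _ _ _).mpr ⟨i, h, rfl, rfl, rfl⟩

-- ===== VERDICT (by name: the statement is the Claim_ definition above) =====
theorem has_sequential_pattern_spec : Claim_equal_has_sequential_pattern := by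
  intro password _
  exact ports_agree password
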